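-- pv_equiv track=rewrite | github.com/merijnvervoorn/coalitie-voorspeller | coalition-calculations-ek.py | is_unrealistic_combo
-- ===== SOURCE A (Python) =====
-- def is_unrealistic_combo(parties):
--     # Add more logic if needed
--     extremes = [
--         ('FvD', 'Volt'),
--         ('PVV', 'BIJ1'),
--         ('SGP', 'BIJ1'),
--         ('FvD', 'D66'),
--         ('PVV', 'GL/PvdA'),
--         ('PVV', 'DENK'),
--         ('PVV', 'Volt'),
--         ('SGP', 'Volt'),
--         ('GL/PvdA', 'BBB'),
--         ('PVV', 'D66'),
--     ]
--     party_set = set(parties)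
--     for a, b in extremes:
--         if a in party_set and b in party_set:
--             return True
--     return False
-- ===== SOURCE B (Python) =====
-- # Adjacency table: each party mapped to the parties it cannot govern with
-- # (both directions of every incompatible pair).
-- INCOMPAT = {
--     'FvD': ('Volt', 'D66'),
--     'PVV': ('BIJ1', 'GL/PvdA', 'DENK', 'Volt', 'D66'),
--     'SGP': ('BIJ1', 'Volt'),
--     'GL/PvdA': ('PVV', 'BBB'),
--     'Volt': ('FvD', 'PVV', 'SGP'),
--     'BIJ1': ('PVV', 'SGP'),
--     'D66': ('FvD', 'PVV'),
--     'DENK': ('PVV',),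
--     'BBB': ('GL/PvdA',),
-- }
--
-- def is_unrealistic_combo(parties):
--     present = set(parties)
--     return any(other in present
--                for p in present
--                for other in INCOMPAT.get(p, ()))
-- ===== Notes on version B (the rewrite author's own statement) =====
-- stated objective: idiomatic
-- what changed: B replaces the scan over the fixed pair list with a precomputed symmetric adjacency dict consulted while iterating over the input's party set, with the search written as a single any(...) generator expression.
import Mathlib
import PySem

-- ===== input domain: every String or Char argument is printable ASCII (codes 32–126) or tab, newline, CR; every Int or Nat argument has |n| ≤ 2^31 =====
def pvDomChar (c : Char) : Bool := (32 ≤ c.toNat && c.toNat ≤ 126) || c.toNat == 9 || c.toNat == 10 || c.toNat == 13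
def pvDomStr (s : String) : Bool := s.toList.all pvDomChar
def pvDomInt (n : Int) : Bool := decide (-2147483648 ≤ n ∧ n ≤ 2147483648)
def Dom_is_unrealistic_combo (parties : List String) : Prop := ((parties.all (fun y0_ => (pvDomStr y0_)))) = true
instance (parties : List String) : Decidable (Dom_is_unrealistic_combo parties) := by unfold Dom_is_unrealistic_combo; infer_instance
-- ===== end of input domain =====

-- B consults a symmetric adjacency dict while iterating over the input's party set,
-- instead of scanning A's fixed pair list (objective: idiomatic).

-- ===== PORT A =====
def extremesA : List (String × String) :=
  [("FvD", "Volt"), ("PVV", "BIJ1"), ("SGP", "BIJ1"), ("FvD", "D66"),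
   ("PVV", "GL/PvdA"), ("PVV", "DENK"), ("PVV", "Volt"), ("SGP", "Volt"),
   ("GL/PvdA", "BBB"), ("PVV", "D66")]

def is_unrealistic_combo (parties : List String) : Bool :=
  let party_set : PySem.Set String := PySem.Set.ofList parties
  -- 'for a, b in extremes: if a in party_set and b in party_set: return True' / 'return False'
  extremesA.any (fun ab => PySem.Set.contains party_set ab.1 && PySem.Set.contains party_set ab.2)

-- ===== PORT B =====
def incompatTable : PySem.Dict String (List String) :=
  PySem.Dict.ofList
    [("FvD", ["Volt", "D66"]),
     ("PVV", ["BIJ1", "GL/PvdA", "DENK", "Volt", "D66"]),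
     ("SGP", ["BIJ1", "Volt"]),
     ("GL/PvdA", ["PVV", "BBB"]),
     ("Volt", ["FvD", "PVV", "SGP"]),
     ("BIJ1", ["PVV", "SGP"]),
     ("D66", ["FvD", "PVV"]),
     ("DENK", ["PVV"]),
     ("BBB", ["GL/PvdA"])]

def is_unrealistic_combo_alt (parties : List String) : Bool :=
  let present : PySem.Set String := PySem.Set.ofList parties
  -- any(other in present for p in present for other in INCOMPAT.get(p, ()))
  -- (iterating a Python set is safe here: any(...) is independent of iteration order)
  present.any (fun p => (incompatTable.getD p []).any (fun other => PySem.Set.contains present other))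

-- ===== PRECONDITION & SPEC =====
def Spec_is_unrealistic_combo (parties : List String) (out : Bool) : Prop := out = is_unrealistic_combo_alt parties
instance (parties : List String) (out : Bool) : Decidable (Spec_is_unrealistic_combo parties out) := by unfold Spec_is_unrealistic_combo; infer_instance

-- ===== CLAIM (what is proved, stated in full; the proofs are below) =====
def Claim_equal_is_unrealistic_combo : Prop := ∀ (parties : List String), Dom_is_unrealistic_combo parties → Spec_is_unrealistic_combo parties (is_unrealistic_combo parties)

-- ===== LEMMAS AND PROOFS =====

-- the 9 parties that occur in the tables
def keyParties : List String :=
  ["FvD", "PVV", "SGP", "GL/PvdA", "Volt", "BIJ1", "D66", "DENK", "BBB"]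

-- the adjacency lookup, written out as an if-chain over the 9 keys
lemma getD_incompatTable (p : String) :
    incompatTable.getD p [] =
      if p = "FvD" then ["Volt", "D66"]
      else if p = "PVV" then ["BIJ1", "GL/PvdA", "DENK", "Volt", "D66"]
      else if p = "SGP" then ["BIJ1", "Volt"]
      else if p = "GL/PvdA" then ["PVV", "BBB"]
      else if p = "Volt" then ["FvD", "PVV", "SGP"]
      else if p = "BIJ1" then ["PVV", "SGP"]
      else if p = "D66" then ["FvD", "PVV"]
      else if p = "DENK" then ["PVV"]
      else if p = "BBB" then ["GL/PvdA"]
      else [] := by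
  have hmk : incompatTable =
      PySem.Dict.mk
        [("FvD", ["Volt", "D66"]),
         ("PVV", ["BIJ1", "GL/PvdA", "DENK", "Volt", "D66"]),
         ("SGP", ["BIJ1", "Volt"]),
         ("GL/PvdA", ["PVV", "BBB"]),
         ("Volt", ["FvD", "PVV", "SGP"]),
         ("BIJ1", ["PVV", "SGP"]),
         ("D66", ["FvD", "PVV"]),
         ("DENK", ["PVV"]),
         ("BBB", ["GL/PvdA"])] := by decide
  by_cases h1 : p = "FvD"
  · subst h1; decide
  by_cases h2 : p = "PVV"
  · subst h2; decide
  by_cases h3 : p = "SGP"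
  · subst h3; decide
  by_cases h4 : p = "GL/PvdA"
  · subst h4; decide
  by_cases h5 : p = "Volt"
  · subst h5; decide
  by_cases h6 : p = "BIJ1"
  · subst h6; decide
  by_cases h7 : p = "D66"
  · subst h7; decide
  by_cases h8 : p = "DENK"
  · subst h8; decide
  by_cases h9 : p = "BBB"
  · subst h9; decide
  rw [hmk, PySem.Dict.getD_eq_get?_getD]
  simp [beq_iff_eq, Ne.symm h1, Ne.symm h2, Ne.symm h3, Ne.symm h4, Ne.symm h5, Ne.symm h6, Ne.symm h7, Ne.symm h8, Ne.symm h9, h1, h2, h3, h4, h5, h6, h7, h8, h9, PySem.Dict.get?]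

-- membership in set(l) coincides with membership in l (both as List.contains)
lemma ofList_listContains (l : List String) (x : String) :
    List.contains (PySem.Set.ofList l) x = List.contains l x := by
  rw [Bool.eq_iff_iff]
  simp only [List.contains_iff_mem, PySem.Set.mem_ofList]

-- Python 'in' on set(l) coincides with List.contains on l
lemma ofList_setContains (l : List String) (x : String) :
    PySem.Set.contains (PySem.Set.ofList l) x = l.contains x := by
  rw [Bool.eq_iff_iff]
  simp only [PySem.Set.contains_iff, List.contains_iff_mem, PySem.Set.mem_ofList]

-- an any over a list whose predicate holds only on `keys` = an any over `keys`
lemma any_support (l : List String) (h : String → Bool) (keys : List String)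
    (hk : ∀ p, h p = true → p ∈ keys) :
    l.any h = keys.any (fun k => l.contains k && h k) := by
  rw [Bool.eq_iff_iff]
  simp only [List.any_eq_true, Bool.and_eq_true, List.contains_iff_mem]
  constructor
  · rintro ⟨p, hp, hh⟩; exact ⟨p, hk p hh, hp, hh⟩
  · rintro ⟨k, _, hkl, hh⟩; exact ⟨k, hkl, hh⟩

-- the inner lookup can only fire on one of the 9 key parties
lemma inner_support (present : PySem.Set String) (p : String)
    (h : ((incompatTable.getD p []).any (fun other => PySem.Set.contains present other)) = true) :
    p ∈ keyParties := by
  by_contra hnp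
  simp only [keyParties, List.mem_cons, List.not_mem_nil, or_false, not_or] at hnp
  obtain ⟨n1, n2, n3, n4, n5, n6, n7, n8, n9⟩ := hnp
  rw [getD_incompatTable] at h
  simp [n1, n2, n3, n4, n5, n6, n7, n8, n9] at h

-- ===== VERDICT (by name: the statement is the Claim_ definition above) =====
theorem is_unrealistic_combo_spec : Claim_equal_is_unrealistic_combo := by
  intro parties _
  unfold Spec_is_unrealistic_combo is_unrealistic_combo is_unrealistic_combo_alt
  rw [any_support (PySem.Set.ofList parties) _ keyParties (inner_support (PySem.Set.ofList parties))]
  simp only [keyParties, extremesA, List.any_cons, List.any_nil, getD_incompatTable,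
    ofList_listContains, ofList_setContains]
  simp
  generalize decide ("FvD" ∈ parties) = b1
  generalize decide ("PVV" ∈ parties) = b2
  generalize decide ("SGP" ∈ parties) = b3
  generalize decide ("GL/PvdA" ∈ parties) = b4
  generalize decide ("Volt" ∈ parties) = b5
  generalize decide ("BIJ1" ∈ parties) = b6
  generalize decide ("D66" ∈ parties) = b7
  generalize decide ("DENK" ∈ parties) = b8
  generalize decide ("BBB" ∈ parties) = b9
  revert b1 b2 b3 b4 b5 b6 b7 b8 b9
  decide
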